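-- pv_equiv track=rewrite | github.com/nasa/fprime | Autocoders/Python/src/fprime_ac/generators/formatters.py | _getEndsExcludingNewlines
-- ===== SOURCE A (Python) =====
-- def _getEndsExcludingNewlines(line_list):
--     """
--     Eddie B. added 7 Aug. 2007
--     Return the index last element of the list + 1, with the thrown away
--     elements being all white space.
--     Return -1 if all white space.
--     """
--
--     index = len(line_list) - 1
--
--     while index >= 0:
--         item = line_list[index]
--         item = item.strip()
--         if item != "":
--             return index + 1
--         index -= 1
--
--     return -1
-- ===== SOURCE B (Python) =====
-- def _getEndsExcludingNewlines(line_list):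
--     last = -1
--     for i, item in enumerate(line_list):
--         if item.strip() != "":
--             last = i + 1
--     return last
-- ===== Notes on version B (the rewrite author's own statement) =====
-- stated objective: alternative
-- what changed: Replaces the backward while-loop with early return by a forward single pass keeping an accumulator 'last' (index after the most recent non-whitespace item), returned after the loop.
import Mathlib
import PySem

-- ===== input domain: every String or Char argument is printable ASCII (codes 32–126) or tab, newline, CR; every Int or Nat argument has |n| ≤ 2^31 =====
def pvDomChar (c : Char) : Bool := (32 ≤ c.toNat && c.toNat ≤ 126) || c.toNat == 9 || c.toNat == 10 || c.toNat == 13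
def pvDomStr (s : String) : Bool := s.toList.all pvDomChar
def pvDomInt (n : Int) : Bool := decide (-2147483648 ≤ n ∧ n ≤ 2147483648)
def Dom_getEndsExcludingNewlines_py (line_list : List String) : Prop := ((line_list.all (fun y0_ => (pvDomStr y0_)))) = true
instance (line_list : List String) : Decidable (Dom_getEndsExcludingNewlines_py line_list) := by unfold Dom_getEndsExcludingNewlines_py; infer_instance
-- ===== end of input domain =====

-- B replaces A's backward scan with early return by a forward pass with an accumulator; same cost ("alternative").

-- ===== PORT A =====
-- backward while-loop: index runs len-1, len-2, …, 0; early return index+1 on first non-whitespace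
def pvLoopA (l : List String) : Nat → Int
  | 0 => -1
  | n + 1 =>
    -- index n is always in range here, so .getD "" is exact (pyGet? returns some)
    let item := PySem.Str.strip ((PySem.List.pyGet? l (n : Int)).getD "")
    if item ≠ "" then (n : Int) + 1 else pvLoopA l n

def getEndsExcludingNewlines_py (line_list : List String) : Int :=
  pvLoopA line_list line_list.length

-- ===== PORT B =====
def getEndsExcludingNewlines_py_alt (line_list : List String) : Int :=
  (PySem.List.enumerate line_list).foldl
    (fun last p => if PySem.Str.strip p.2 ≠ "" then p.1 + 1 else last) (-1)

-- ===== PRECONDITION & SPEC =====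
def Spec_getEndsExcludingNewlines_py (line_list : List String) (out : Int) : Prop := out = getEndsExcludingNewlines_py_alt line_list
instance (line_list : List String) (out : Int) : Decidable (Spec_getEndsExcludingNewlines_py line_list out) := by unfold Spec_getEndsExcludingNewlines_py; infer_instance

-- ===== CLAIM (what is proved, stated in full; the proofs are below) =====
def Claim_equal_getEndsExcludingNewlines_py : Prop := ∀ (line_list : List String), Dom_getEndsExcludingNewlines_py line_list → Spec_getEndsExcludingNewlines_py line_list (getEndsExcludingNewlines_py line_list)

-- ===== LEMMAS AND PROOFS =====

-- appending one element does not change the backward scan below the old length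
theorem pvLoopA_append (xs : List String) (x : String) (n : Nat) (hn : n ≤ xs.length) :
    pvLoopA (xs ++ [x]) n = pvLoopA xs n := by
  induction n with
  | zero => rfl
  | succ k ih =>
    simp only [pvLoopA, PySem.List.pyGet?_natCast,
      List.getElem?_append_left (by omega : k < xs.length)]
    rw [ih (by omega)]

theorem pvLoopA_eq_fold (l : List String) :
    pvLoopA l l.length =
      (PySem.List.enumerate l).foldl
        (fun last p => if PySem.Str.strip p.2 ≠ "" then p.1 + 1 else last) (-1) := by
  induction l using List.reverseRecOn with
  | nil => rfl
  | append_singleton xs x ih =>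
    have hget : PySem.List.pyGet? (xs ++ [x]) ((xs.length : Nat) : Int) = some x := by
      simp
    simp only [List.length_append, List.length_cons, List.length_nil, pvLoopA, hget,
      PySem.List.enumerate_append, List.foldl_append]
    rw [pvLoopA_append xs x xs.length (le_refl _), ih]
    simp [PySem.List.enumerate]

-- ===== VERDICT (by name: the statement is the Claim_ definition above) =====
theorem getEndsExcludingNewlines_py_spec : Claim_equal_getEndsExcludingNewlines_py := by
  intro l _
  unfold Spec_getEndsExcludingNewlines_py getEndsExcludingNewlines_py getEndsExcludingNewlines_py_alt
  exact pvLoopA_eq_fold l
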